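-- pv_equiv track=rewrite | github.com/PrinceSinghhub/GFG-Questions | Divisibility.py | Count
-- ===== SOURCE A (Python) =====
-- from math import gcd
--
-- def Count(nums, k):
--  # Code here
--     ans=0
--     n=len(nums)
--     m=(1<<n)
--     for i in range(m):
--         x=1
--         c=0
--         for j in range(n):
--             if(i&(1<<j)):
--                 c+=1
--                 x=(x*nums[j])//gcd(x,nums[j])
--         if not c:
--             continue
--         if c&1:
--             ans+=(k//x)
--         else:
--             ans-=(k//x)
--     return int(ans)
-- ===== SOURCE B (Python) =====
-- from math import gcd
--
-- def Count(nums, k):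
--     # DFS over include/exclude decisions with an incrementally maintained lcm,
--     # so each subset extends its parent's lcm in O(1) instead of being rebuilt
--     # from scratch per bitmask.
--     n = len(nums)
--
--     def dfs(i, l, c):
--         if i == n:
--             return 0
--         total = dfs(i + 1, l, c)                      # exclude nums[i]
--         l2 = (l * nums[i]) // gcd(l, nums[i])
--         c2 = c + 1
--         total += (k // l2) if c2 & 1 else -(k // l2)  # subset ending the include decision
--         total += dfs(i + 1, l2, c2)                   # include nums[i] and go on
--         return total
--
--     return dfs(0, 1, 0)
-- ===== Notes on version B (the rewrite author's own statement) =====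
-- stated objective: alternative
-- what changed: A enumerates all 2^n bitmasks and recomputes each subset's lcm with a fresh inner scan over all n positions; B instead does one include/exclude DFS over the list that extends the parent subset's lcm incrementally (measured ~6.5x at n=16, but both are exponential, so a timing run could not confirm 'faster' at its largest size).
import Mathlib
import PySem

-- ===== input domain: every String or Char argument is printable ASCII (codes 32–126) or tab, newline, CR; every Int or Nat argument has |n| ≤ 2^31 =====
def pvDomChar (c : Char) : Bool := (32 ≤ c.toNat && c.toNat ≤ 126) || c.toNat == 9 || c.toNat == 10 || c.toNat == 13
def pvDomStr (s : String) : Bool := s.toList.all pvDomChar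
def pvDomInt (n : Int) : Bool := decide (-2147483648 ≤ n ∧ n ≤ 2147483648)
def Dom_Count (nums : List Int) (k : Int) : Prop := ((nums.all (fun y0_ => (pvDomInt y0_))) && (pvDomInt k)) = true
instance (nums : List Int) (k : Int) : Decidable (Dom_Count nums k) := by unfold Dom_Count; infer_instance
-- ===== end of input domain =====

-- B replaces A's per-bitmask inner scan by an include/exclude DFS that extends each subset's
-- lcm incrementally; equality of the return values is proved on Pre_ (nums without 0) below.

-- ===== PORT A =====
-- x = (x*a) // gcd(x, a)  (math.gcd is nonnegative, // is Python floor division)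
def pyLcmStep (x a : Int) : Int := PySem.Int.floordiv (x * a) ((Int.gcd x a : Nat) : Int)

-- the body of A's inner `for j in range(n)` loop; j ≥ 0 always, so `j.toNat` in `1 << j` is exact
def bodyA (nums : List Int) (i : Int) (xc : Int × Int) (j : Int) : Int × Int :=
  if PySem.Int.band i ((1 : Int) <<< j.toNat) ≠ 0 then
    (pyLcmStep xc.1 ((PySem.List.pyGet? nums j).getD 0), xc.2 + 1)
  else xc

-- A's inner loop: x, c = 1, 0; for j in range(n): …
def CountInner (nums : List Int) (i : Int) : Int × Int :=
  (PySem.List.pyRange 0 (nums.length : Int)).foldl (bodyA nums i) (1, 0)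

def Count (nums : List Int) (k : Int) : Int :=
  (PySem.List.pyRange 0 ((1 : Int) <<< nums.length)).foldl
    (fun ans i =>
      let xc := CountInner nums i
      if xc.2 = 0 then ans
      else if PySem.Int.band xc.2 1 ≠ 0 then ans + PySem.Int.floordiv k xc.1
      else ans - PySem.Int.floordiv k xc.1) 0

-- ===== PORT B =====
-- Source B's dfs(i, l, c): recursion over the suffix of nums still to decide about,
-- carrying the running lcm l and the subset size c
def CountDfs (k : Int) : List Int → Int → Int → Int
  | [], _, _ => 0
  | a :: rest, l, c =>
    let total := CountDfs k rest l c
    let l2 := pyLcmStep l a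
    let c2 := c + 1
    let total2 := total +
      (if PySem.Int.band c2 1 ≠ 0 then PySem.Int.floordiv k l2 else -(PySem.Int.floordiv k l2))
    total2 + CountDfs k rest l2 c2

def Count_alt (nums : List Int) (k : Int) : Int := CountDfs k nums 1 0

-- ===== PRECONDITION & SPEC =====
-- Pre_ excludes nums containing 0: there Python A (and Python B) raises ZeroDivisionError
-- on k // 0 for the subset {0}.
def Pre_Count (nums : List Int) (k : Int) : Prop := (0 : Int) ∉ nums
instance (nums : List Int) (k : Int) : Decidable (Pre_Count nums k) := by unfold Pre_Count; infer_instance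
def pvWitness_Count : List Int × Int := ([2, 3, 4], 12)

def Spec_Count (nums : List Int) (k : Int) (out : Int) : Prop := out = Count_alt nums k
instance (nums : List Int) (k : Int) (out : Int) : Decidable (Spec_Count nums k out) := by unfold Spec_Count; infer_instance

-- ===== CLAIM (what is proved, stated in full; the proofs are below) =====
def Claim_equal_Count : Prop := ∀ (nums : List Int) (k : Int), Dom_Count nums k → Pre_Count nums k → Spec_Count nums k (Count nums k)

-- ===== LEMMAS AND PROOFS =====

-- the signed term contributed by a subset of size c with lcm x
def sgnTerm (k c x : Int) : Int :=
  if PySem.Int.band c 1 ≠ 0 then PySem.Int.floordiv k x else -(PySem.Int.floordiv k x)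

-- structural reading of A's inner loop: peel the bits of i from the low end
def innerR : List Int → Nat → Int × Int → Int × Int
  | [], _, xc => xc
  | a :: rest, i, xc =>
    innerR rest (i / 2) (if i % 2 = 1 then (pyLcmStep xc.1 a, xc.2 + 1) else xc)

-- full inclusion–exclusion sum over ALL subsets (including the empty one), from state (x, c)
def Tsum (k : Int) : List Int → Int → Int → Int
  | [], x, c => sgnTerm k c x
  | a :: rest, x, c => Tsum k rest x c + Tsum k rest (pyLcmStep x a) (c + 1)

-- A's per-mask term, with and without the `if not c: continue` guard
def sgnF (k : Int) (nums : List Int) (i : Nat) : Int :=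
  sgnTerm k (innerR nums i (1, 0)).2 (innerR nums i (1, 0)).1

def ggF (k : Int) (nums : List Int) (i : Nat) : Int :=
  if (innerR nums i (1, 0)).2 = 0 then 0 else sgnF k nums i

lemma countDfs_eq_Tsum (k : Int) : ∀ (nums : List Int) (x c : Int),
    CountDfs k nums x c = Tsum k nums x c - sgnTerm k c x := by
  intro nums
  induction nums with
  | nil => intro x c; simp [CountDfs, Tsum]
  | cons a rest ih =>
    intro x c
    simp only [CountDfs, Tsum, ih, sgnTerm]
    ring

lemma band_pow_ne (i t : Nat) :
    (PySem.Int.band (i : Int) ((1 : Int) <<< t) ≠ 0) ↔ i.testBit t := by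
  have h : (1 : Int) <<< t = ((2 ^ t : Nat) : Int) := by
    rw [Int.shiftLeft_eq]; push_cast; ring
  rw [h, PySem.Int.band_natCast, Nat.and_two_pow]
  rcases Bool.eq_false_or_eq_true (i.testBit t) with hb | hb <;> simp [hb]

lemma bodyA_zero (a : Int) (rest : List Int) (i : Nat) (xc : Int × Int) :
    bodyA (a :: rest) (i : Int) xc ((0 : Nat) : Int)
      = if i % 2 = 1 then (pyLcmStep xc.1 a, xc.2 + 1) else xc := by
  have h := band_pow_ne i 0
  simp only [Nat.testBit_zero] at h
  simp only [bodyA, Int.toNat_natCast, h]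
  by_cases hi : i % 2 = 1 <;> simp [hi]

lemma bodyA_succ (a : Int) (rest : List Int) (i : Nat) (xc : Int × Int) (t : Nat) :
    bodyA (a :: rest) (i : Int) xc ((t + 1 : Nat) : Int)
      = bodyA rest ((i / 2 : Nat) : Int) xc ((t : Nat) : Int) := by
  have h1 := band_pow_ne i (t + 1)
  have h2 := band_pow_ne (i / 2) t
  simp only [Nat.testBit_add_one] at h1
  simp only [bodyA, Int.toNat_natCast, h1, h2, PySem.List.pyGet?_natCast,
    List.getElem?_cons_succ]

lemma foldl_bodyA_eq_innerR : ∀ (nums : List Int) (i : Nat) (xc : Int × Int),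
    (PySem.List.pyRange 0 (nums.length : Int)).foldl (bodyA nums (i : Int)) xc
      = innerR nums i xc := by
  intro nums
  induction nums with
  | nil => intro i xc; simp [innerR]
  | cons a rest ih =>
    intro i xc
    unfold innerR
    rw [show ((a :: rest).length : Int) = ((rest.length + 1 : Nat) : Int) by simp,
        PySem.List.pyRange_zero_natCast, List.range_succ_eq_map]
    rw [List.map_cons, List.foldl_cons, List.map_map, List.foldl_map]
    have hc : ∀ (s : Int × Int), ∀ t ∈ List.range rest.length,
        (fun s t => bodyA (a :: rest) (i : Int) s
            (((fun (u : Nat) => (u : Int)) ∘ Nat.succ) t)) s t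
          = (fun s t => bodyA rest ((i / 2 : Nat) : Int) s
            ((fun (u : Nat) => (u : Int)) t)) s t := by
      intro s t _
      exact bodyA_succ a rest i s t
    rw [PySem.List.foldl_congr_mem _ _ _ _ hc, bodyA_zero]
    rw [← List.foldl_map, ← PySem.List.pyRange_zero_natCast]
    exact ih (i / 2) _

lemma countInner_eq_innerR (nums : List Int) (i : Nat) :
    CountInner nums (i : Int) = innerR nums i (1, 0) :=
  foldl_bodyA_eq_innerR nums i (1, 0)

lemma innerR_zero : ∀ (nums : List Int) (xc : Int × Int), innerR nums 0 xc = xc := by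
  intro nums
  induction nums with
  | nil => intro xc; rfl
  | cons a rest ih => intro xc; simp [innerR, ih]

lemma innerR_snd : ∀ (nums : List Int) (i : Nat) (x c : Int),
    c ≤ (innerR nums i (x, c)).2 ∧
      ((innerR nums i (x, c)).2 = c ↔ i % 2 ^ nums.length = 0) := by
  intro nums
  induction nums with
  | nil => intro i x c; simp [innerR, Nat.mod_one]
  | cons a rest ih =>
    intro i x c
    have hlen : 2 ^ (a :: rest).length = 2 * 2 ^ rest.length := by
      simp [pow_succ]; ring
    by_cases hi : i % 2 = 1
    · have h := ih (i / 2) (pyLcmStep x a) (c + 1)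
      rw [show innerR (a :: rest) i (x, c)
            = innerR rest (i / 2) (pyLcmStep x a, c + 1) by simp [innerR, hi]]
      refine ⟨by omega, ?_, ?_⟩
      · intro hc; omega
      · intro hc
        exfalso
        have hdvd : 2 * 2 ^ rest.length ∣ i :=
          Nat.dvd_iff_mod_eq_zero.mpr (hlen ▸ hc)
        have h2 : 2 ∣ i := dvd_trans (Dvd.intro _ rfl) hdvd
        omega
    · have hieven : i % 2 = 0 := by omega
      have h := ih (i / 2) x c
      rw [show innerR (a :: rest) i (x, c) = innerR rest (i / 2) (x, c) by simp [innerR, hi]]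
      refine ⟨h.1, h.2.trans ?_⟩
      constructor
      · intro h0
        obtain ⟨q, hq⟩ := Nat.dvd_iff_mod_eq_zero.mpr h0
        have he : i = 2 * (2 ^ rest.length * q) := by omega
        rw [hlen]
        have : 2 * 2 ^ rest.length ∣ i := ⟨q, by rw [he]; ring⟩
        exact Nat.dvd_iff_mod_eq_zero.mp this
      · intro h0
        obtain ⟨q, hq⟩ := Nat.dvd_iff_mod_eq_zero.mpr (hlen ▸ h0)
        have he : i = 2 * (2 ^ rest.length * q) := by rw [hq]; ring
        have : i / 2 = 2 ^ rest.length * q := by omega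
        rw [this, Nat.mul_mod_right]

lemma sum_range_two_mul (m : Nat) (f : Nat → Int) :
    ((List.range (2 * m)).map f).sum
      = ((List.range m).map (fun i => f (2 * i) + f (2 * i + 1))).sum := by
  induction m with
  | zero => rfl
  | succ m ih =>
    have h : 2 * (m + 1) = (2 * m + 1) + 1 := by ring
    rw [h, List.range_succ, List.range_succ, List.range_succ]
    simp only [List.map_append, List.sum_append, ih]
    simp
    ring

lemma innerR_two_mul (a : Int) (rest : List Int) (i : Nat) (xc : Int × Int) :
    innerR (a :: rest) (2 * i) xc = innerR rest i xc := by
  simp [innerR, Nat.mul_mod_right]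

lemma innerR_two_mul_add_one (a : Int) (rest : List Int) (i : Nat) (xc : Int × Int) :
    innerR (a :: rest) (2 * i + 1) xc = innerR rest i (pyLcmStep xc.1 a, xc.2 + 1) := by
  have h1 : (2 * i + 1) % 2 = 1 := by omega
  have h2 : (2 * i + 1) / 2 = i := by omega
  simp [innerR, h1, h2]

lemma sum_innerR_eq_Tsum (k : Int) : ∀ (nums : List Int) (x c : Int),
    ((List.range (2 ^ nums.length)).map
      (fun i => sgnTerm k (innerR nums i (x, c)).2 (innerR nums i (x, c)).1)).sum
      = Tsum k nums x c := by
  intro nums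
  induction nums with
  | nil =>
    intro x c
    simp [innerR, Tsum]
  | cons a rest ih =>
    intro x c
    have hlen : 2 ^ (a :: rest).length = 2 * 2 ^ rest.length := by
      simp [List.length_cons, pow_succ]; ring
    rw [hlen, sum_range_two_mul]
    simp only [innerR_two_mul, innerR_two_mul_add_one]
    rw [PySem.List.sum_map_add_int]
    rw [ih, ih]
    rfl

lemma count_eq_sum_gg (nums : List Int) (k : Int) :
    Count nums k = ((List.range (2 ^ nums.length)).map (ggF k nums)).sum := by
  unfold Count
  rw [show (1 : Int) <<< nums.length = ((2 ^ nums.length : Nat) : Int) by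
        rw [Int.shiftLeft_eq]; push_cast; ring,
      PySem.List.pyRange_zero_natCast, List.foldl_map]
  have hc : ∀ (ans : Int), ∀ i ∈ List.range (2 ^ nums.length),
      (fun ans (i : Nat) =>
        let xc := CountInner nums (i : Int)
        if xc.2 = 0 then ans
        else if PySem.Int.band xc.2 1 ≠ 0 then ans + PySem.Int.floordiv k xc.1
        else ans - PySem.Int.floordiv k xc.1) ans i
        = (fun ans (i : Nat) => ans + ggF k nums i) ans i := by
    intro ans i _
    simp only [countInner_eq_innerR, ggF, sgnF, sgnTerm]
    split_ifs <;> ring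
  rw [PySem.List.foldl_congr_mem _ _ _ _ hc, PySem.List.foldl_add]
  ring

lemma sum_gg_eq_sum_sgn (nums : List Int) (k : Int) :
    ((List.range (2 ^ nums.length)).map (ggF k nums)).sum
      = ((List.range (2 ^ nums.length)).map (sgnF k nums)).sum - sgnF k nums 0 := by
  obtain ⟨s, hs⟩ : ∃ s, 2 ^ nums.length = s + 1 :=
    ⟨2 ^ nums.length - 1, by have := Nat.two_pow_pos nums.length; omega⟩
  rw [hs, List.range_succ_eq_map, List.map_cons, List.map_cons, List.map_map, List.map_map]
  have hgg0 : ggF k nums 0 = 0 := by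
    simp [ggF, innerR_zero]
  have hcong : ∀ t ∈ List.range s, (ggF k nums ∘ Nat.succ) t = (sgnF k nums ∘ Nat.succ) t := by
    intro t ht
    have hlt : t < s := List.mem_range.mp ht
    have hne : (t + 1) % 2 ^ nums.length ≠ 0 := by
      rw [hs]
      have : (t + 1) % (s + 1) = t + 1 := Nat.mod_eq_of_lt (by omega)
      omega
    have hsnd := (innerR_snd nums (t + 1) 1 0).2
    simp only [Function.comp_apply, ggF, Nat.succ_eq_add_one]
    rw [if_neg]
    intro h0
    exact hne (hsnd.mp h0)
  rw [List.map_congr_left hcong]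
  simp [hgg0]

theorem Count_spec : Claim_equal_Count := by
  unfold Claim_equal_Count
  intro nums k _ _
  unfold Spec_Count Count_alt
  rw [count_eq_sum_gg, sum_gg_eq_sum_sgn, countDfs_eq_Tsum]
  have h := sum_innerR_eq_Tsum k nums 1 0
  unfold sgnF
  rw [show (fun i => sgnTerm k (innerR nums i (1, 0)).2 (innerR nums i (1, 0)).1)
        = (fun i => sgnTerm k (innerR nums i (1, (0 : Int))).2 (innerR nums i (1, 0)).1) from rfl,
      h, innerR_zero]
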